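-- pv_equiv track=rewrite | github.com/khmomtech/sv-tms | scripts/generate_per_row_upserts.py | split_top_level_tuples
-- ===== SOURCE A (Python) =====
-- def split_top_level_tuples(values_text):
--     """Split the content after VALUES into a list of tuple strings.
--
--     values_text is the substring that starts at the first '(' of the first tuple
--     and ends at the matching ')' for the last tuple (not including trailing semicolon).
--     This function returns a list like ['(... )', '(... )', ...] each including surrounding parens.
--     The parser respects single-quoted strings and backslash escapes.
--     """
--     tuples = []
--     i = 0
--     n = len(values_text)
--     in_quote = False
--     escape = False
--     depth = 0
--     start = None
--
--     while i < n:
--         ch = values_text[i]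
--         if in_quote:
--             if escape:
--                 escape = False
--             elif ch == "\\":
--                 escape = True
--             elif ch == "'":
--                 in_quote = False
--         else:
--             if ch == "'":
--                 in_quote = True
--             elif ch == '(':
--                 if depth == 0:
--                     start = i
--                 depth += 1
--             elif ch == ')':
--                 depth -= 1
--                 if depth == 0 and start is not None:
--                     # include from start to i (inclusive)
--                     tuples.append(values_text[start:i+1])
--                     start = None
--         i += 1
--
--     return tuples
-- ===== SOURCE B (Python) =====
-- def split_top_level_tuples(values_text):
--     """Two-pass version: first materialize a mask of characters that belong to
--     single-quoted strings (quotes, escapes and content), then scan only the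
--     unmasked characters for top-level parentheses."""
--     # Pass 1: build the in-string mask.
--     mask = []
--     in_q = False
--     esc = False
--     for ch in values_text:
--         if in_q:
--             mask.append(True)
--             if esc:
--                 esc = False
--             elif ch == "\\":
--                 esc = True
--             elif ch == "'":
--                 in_q = False
--         else:
--             in_q = ch == "'"
--             mask.append(in_q)
--     # Pass 2: depth scan over the unmasked characters only.
--     out = []
--     depth = 0
--     start = None
--     for k, ch in enumerate(values_text):
--         if mask[k]:
--             continue
--         if ch == '(':
--             if depth == 0:
--                 start = k
--             depth += 1
--         elif ch == ')':
--             depth -= 1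
--             if depth == 0 and start is not None:
--                 out.append(values_text[start:k + 1])
--                 start = None
--     return out
-- ===== Notes on version B (the rewrite author's own statement) =====
-- stated objective: alternative
-- what changed: Replaces A's single fused quote/escape/paren state machine with a two-pass decomposition: pass 1 materializes a boolean mask of every character inside single-quoted strings (handling backslash escapes), pass 2 runs a plain depth scan over the unmasked characters only.
import Mathlib
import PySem

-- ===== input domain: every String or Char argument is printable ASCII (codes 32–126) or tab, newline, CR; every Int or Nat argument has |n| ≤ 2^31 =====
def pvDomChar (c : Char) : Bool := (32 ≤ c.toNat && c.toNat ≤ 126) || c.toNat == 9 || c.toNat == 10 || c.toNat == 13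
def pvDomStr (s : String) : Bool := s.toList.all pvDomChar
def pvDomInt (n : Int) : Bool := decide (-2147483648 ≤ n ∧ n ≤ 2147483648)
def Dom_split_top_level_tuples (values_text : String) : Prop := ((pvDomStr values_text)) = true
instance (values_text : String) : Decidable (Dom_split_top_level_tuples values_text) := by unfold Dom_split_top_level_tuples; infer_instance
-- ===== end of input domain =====

-- B replaces A's fused quote/escape/paren state machine by a two-pass decomposition
-- (materialized in-string mask, then a depth scan over unmasked characters); objective: alternative.

-- ===== PORT A =====
-- A's fused while-loop: one recursion over the remaining characters, carrying
-- (i, in_quote, escape, depth, start, tuples) exactly as the Python does.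
def pvA_loop (orig : List Char) : List Char → Nat → Bool → Bool → Int → Option Nat → List String → List String
  | [], _, _, _, _, _, tuples => tuples
  | ch :: rest, i, in_quote, escape, depth, start, tuples =>
    if in_quote then
      if escape then
        pvA_loop orig rest (i + 1) in_quote false depth start tuples
      else if ch = '\\' then
        pvA_loop orig rest (i + 1) in_quote true depth start tuples
      else if ch = '\'' then
        pvA_loop orig rest (i + 1) false escape depth start tuples
      else
        pvA_loop orig rest (i + 1) in_quote escape depth start tuples
    else
      if ch = '\'' then
        pvA_loop orig rest (i + 1) true escape depth start tuples
      else if ch = '(' then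
        pvA_loop orig rest (i + 1) in_quote escape (depth + 1)
          (if depth = 0 then some i else start) tuples
      else if ch = ')' then
        let depth' := depth - 1
        match start with
        | some st =>
          if depth' = 0 then
            pvA_loop orig rest (i + 1) in_quote escape depth' none
              (tuples ++ [String.ofList (PySem.List.slice orig (some (st : Int)) (some ((i : Int) + 1)))])
          else
            pvA_loop orig rest (i + 1) in_quote escape depth' (some st) tuples
        | none => pvA_loop orig rest (i + 1) in_quote escape depth' none tuples
      else
        pvA_loop orig rest (i + 1) in_quote escape depth start tuples

def split_top_level_tuples (values_text : String) : List String :=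
  pvA_loop values_text.toList values_text.toList 0 false false 0 none []

-- ===== PORT B =====
-- Pass 1: the in-string mask (one Bool per character).
def pvB_mask : Bool → Bool → List Char → List Bool
  | _, _, [] => []
  | true, esc, ch :: rest =>
    true :: (if esc then pvB_mask true false rest
             else if ch = '\\' then pvB_mask true true rest
             else if ch = '\'' then pvB_mask false esc rest
             else pvB_mask true esc rest)
  | false, esc, ch :: rest =>
    (ch = '\'') :: pvB_mask (ch = '\'') esc rest

-- Pass 2: depth scan over (mask, char) pairs, skipping masked characters.
def pvB_scan (orig : List Char) : List (Bool × Char) → Nat → Int → Option Nat → List String → List String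
  | [], _, _, _, out => out
  | (m, ch) :: rest, k, depth, start, out =>
    if m then
      pvB_scan orig rest (k + 1) depth start out
    else if ch = '(' then
      pvB_scan orig rest (k + 1) (depth + 1) (if depth = 0 then some k else start) out
    else if ch = ')' then
      let depth' := depth - 1
      match start with
      | some st =>
        if depth' = 0 then
          pvB_scan orig rest (k + 1) depth' none
            (out ++ [String.ofList (PySem.List.slice orig (some (st : Int)) (some ((k : Int) + 1)))])
        else
          pvB_scan orig rest (k + 1) depth' (some st) out
      | none => pvB_scan orig rest (k + 1) depth' none out
    else
      pvB_scan orig rest (k + 1) depth start out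

def split_top_level_tuples_alt (values_text : String) : List String :=
  let cs := values_text.toList
  pvB_scan cs (List.zip (pvB_mask false false cs) cs) 0 0 none []

-- ===== PRECONDITION & SPEC =====
def Spec_split_top_level_tuples (values_text : String) (out : List String) : Prop := out = split_top_level_tuples_alt values_text
instance (values_text : String) (out : List String) : Decidable (Spec_split_top_level_tuples values_text out) := by unfold Spec_split_top_level_tuples; infer_instance

-- ===== CLAIM (what is proved, stated in full; the proofs are below) =====
def Claim_equal_split_top_level_tuples : Prop := ∀ (values_text : String), Dom_split_top_level_tuples values_text → Spec_split_top_level_tuples values_text (split_top_level_tuples values_text)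

-- ===== LEMMAS AND PROOFS =====

-- A's fused loop equals B's scan over the mask computed from the same quote state.
lemma pvA_loop_eq_scan (orig : List Char) :
    ∀ (cs : List Char) (i : Nat) (inq esc : Bool) (depth : Int) (start : Option Nat) (acc : List String),
      pvA_loop orig cs i inq esc depth start acc =
        pvB_scan orig (List.zip (pvB_mask inq esc cs) cs) i depth start acc := by
  intro cs
  induction cs with
  | nil => intro i inq esc depth start acc; simp [pvA_loop, pvB_mask, pvB_scan]
  | cons ch rest ih =>
    intro i inq esc depth start acc
    cases inq with
    | true =>
      by_cases hesc : esc = true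
      · subst hesc
        simp [pvA_loop, pvB_mask, pvB_scan, ih]
      · replace hesc : esc = false := by cases esc <;> simp_all
        subst hesc
        by_cases hb : ch = '\\'
        · simp [pvA_loop, pvB_mask, pvB_scan, hb, ih]
        · by_cases hq : ch = '\''
          · simp [pvA_loop, pvB_mask, pvB_scan, hq, ih]
          · simp [pvA_loop, pvB_mask, pvB_scan, hb, hq, ih]
    | false =>
      by_cases hq : ch = '\''
      · simp [pvA_loop, pvB_mask, pvB_scan, hq, ih]
      · by_cases ho : ch = '('
        · simp [pvA_loop, pvB_mask, pvB_scan, ho, ih]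
        · by_cases hc : ch = ')'
          · cases start with
            | none => simp [pvA_loop, pvB_mask, pvB_scan, hc, ih]
            | some st =>
              by_cases hd : depth - 1 = 0
              · simp [pvA_loop, pvB_mask, pvB_scan, hc, hd, ih]
              · simp [pvA_loop, pvB_mask, pvB_scan, hc, hd, ih]
          · simp [pvA_loop, pvB_mask, pvB_scan, hq, ho, hc, ih]

-- ===== VERDICT (by name: the statement is the Claim_ definition above) =====
theorem split_top_level_tuples_spec : Claim_equal_split_top_level_tuples := by
  intro values_text _
  unfold Spec_split_top_level_tuples split_top_level_tuples split_top_level_tuples_alt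
  exact pvA_loop_eq_scan values_text.toList values_text.toList 0 false false 0 none []
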